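-- pv_equiv track=rewrite | github.com/drtjc/3DOXO | helper.py | insert_into_tuple
-- ===== SOURCE A (Python) =====
-- from typing import List, Callable, Union, Iterable, Tuple, Any
--
-- def insert_into_tuple(tup: Tuple, pos: Union[int, Iterable[int]],
--                       val: Union[Any, Iterable[Any]]) -> Tuple:
--     """ Insert values into a tuple.
--
--     Parameters
--     ----------
--     tup : tuple
--         the tuple into which values are to be inserted
--     pos : Union[int, Iterable[int]]
--         The positions into which values are to be inserted
--     val : Union[Any, Iterable[Any]]
--         The values corresponding to the positions in `pos`
--
--     Returns
--     -------
--     Tuple: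
--         A copy of `tup` with values inserted.
--
--     Raises
--     ------
--     ValueError
--         If length of `pos` is not equal to length of `val`
--
--     See Also
--     --------
--     list.insert
--
--     Notes
--     -----
--     `tup` is converted to a list and the list.insert method is used to
--     insert values. the list is then converted to a tuple and returned.
--
--     Examples
--     --------
--     >>> tup = (0, 1, 2, 3)
--     >>> pos = (5, 1)
--     >>> val = (9, 8)
--     >>> insert_into_tuple(tup, pos, val)
--     (0, 8, 1, 2, 3, 9)
--     >>> insert_into_tuple(tup, (), ())
--     (0, 1, 2, 3)
--     """
--
--     tl = list(tup)
--
--     try: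
--         # first assume pos and val are iterable and not single integers
--         if len(pos) != len(val):
--             raise ValueError("pos and val must be of the same length")
--
--         if len(pos) == 0:
--             return tup
--
--         # sort pos so from low to high; sort val correspondingly
--         stl = list(zip(*sorted(zip(pos, val))))
--         for p, v in zip(stl[0], stl[1]):
--             tl.insert(p, v)
--     except:
--         # perhaps pos and cal are integers
--         tl.insert(pos, val)
--
--     return tuple(tl)
-- ===== SOURCE B (Python) =====
-- def insert_into_tuple(tup, pos, val):
--     """Insert values into a tuple: compute each value's final index arithmetically,
--     then build the result in a single fill pass (no repeated list.insert)."""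
--     pos = list(pos)
--     val = list(val)
--     if len(pos) != len(val):
--         raise ValueError("pos and val must be of the same length")
--     n = len(tup)
--     pairs = sorted(zip(pos, val))
--     idx = []
--     for p, _ in pairs:
--         m = n + len(idx)
--         e = p + m if p < 0 else p
--         e = 0 if e < 0 else (m if e > m else e)
--         idx = [x + 1 if e <= x else x for x in idx]
--         idx.append(e)
--     placed = dict(zip(idx, (v for _, v in pairs)))
--     out = []
--     it = iter(tup)
--     for q in range(n + len(pairs)):
--         out.append(placed[q] if q in placed else next(it))
--     return tuple(out)
-- ===== Notes on version B (the rewrite author's own statement) =====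
-- stated objective: alternative
-- what changed: A repeatedly calls list.insert on a growing list (each insert shifts a suffix); B computes each value's final index arithmetically (clamp the position, then bump the pending indices) and builds the output in a single fill pass over the result positions using a dict.
import Mathlib
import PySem

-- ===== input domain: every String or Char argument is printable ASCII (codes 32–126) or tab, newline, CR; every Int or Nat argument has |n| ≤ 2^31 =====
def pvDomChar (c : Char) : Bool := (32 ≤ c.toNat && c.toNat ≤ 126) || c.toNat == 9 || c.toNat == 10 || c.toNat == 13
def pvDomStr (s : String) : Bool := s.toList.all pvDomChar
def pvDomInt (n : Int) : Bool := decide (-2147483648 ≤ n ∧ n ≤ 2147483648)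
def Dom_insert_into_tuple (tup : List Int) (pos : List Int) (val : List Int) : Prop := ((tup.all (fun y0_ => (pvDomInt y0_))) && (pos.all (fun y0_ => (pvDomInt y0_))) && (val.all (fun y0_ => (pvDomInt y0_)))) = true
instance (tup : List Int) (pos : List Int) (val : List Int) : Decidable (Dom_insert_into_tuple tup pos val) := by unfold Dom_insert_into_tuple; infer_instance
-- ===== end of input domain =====

-- B replaces A's repeated list.insert by computing each value's final index arithmetically
-- and building the result in one fill pass over the output positions (objective: alternative).


-- ===== PORT A =====
-- A sorts the (pos, val) pairs (Python tuple order) and does one list.insert per pair.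
def insert_into_tuple (tup : List Int) (pos : List Int) (val : List Int) : List Int :=
  if pos.length ≠ val.length then []        -- ValueError → bare except → tl.insert(list, _) raises; excluded by Pre_
  else if pos.length = 0 then tup
  else
    (PySem.List.sorted2 (pos.zip val) (fun x => x.1) (fun x => x.2)).foldl
      (fun tl pv => PySem.List.insert tl pv.1 pv.2) tup

-- ===== PORT B =====
-- B-side helpers (each mirrors one line of Source B's loop bodies).
-- [x + 1 if e <= x else x for x in idx]
def pvBump (e x : Int) : Int := if e ≤ x then x + 1 else x

-- e = p + m if p < 0 else p ; e = 0 if e < 0 else (m if e > m else e)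
def pvClamp (p m : Int) : Int :=
  let e := if p < 0 then p + m else p
  if e < 0 then 0 else if e > m then m else e

-- body of "for p, _ in pairs: …"
def pvIdxStep (n : Nat) (idx : List Int) (pv : Int × Int) : List Int :=
  let m : Int := (n : Int) + idx.length
  let e := pvClamp pv.1 m
  idx.map (pvBump e) ++ [e]

-- "for q in range(n + len(pairs)): out.append(placed[q] if q in placed else next(it))"
-- state = (out, remaining elements of the iterator over tup); next(it) = headD/tail
-- (under Pre_ the iterator is never exhausted, so the headD default is never used).
def pvFill (placed : PySem.Dict Int Int) (tup : List Int) (bound : Int) : List Int :=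
  ((PySem.List.pyRange 0 bound 1).foldl
    (fun (st : List Int × List Int) q =>
      match placed.get? q with
      | some v => (st.1 ++ [v], st.2)
      | none => (st.1 ++ [st.2.headD 0], st.2.tail)) (([] : List Int), tup)).1

def insert_into_tuple_alt (tup : List Int) (pos : List Int) (val : List Int) : List Int :=
  if pos.length ≠ val.length then []        -- raise ValueError; excluded by Pre_
  else
    let n := tup.length
    let pairs := PySem.List.sorted2 (pos.zip val) (fun x => x.1) (fun x => x.2)
    let idx := pairs.foldl (pvIdxStep n) []
    let placed := PySem.Dict.ofList (idx.zip (pairs.map (fun pv => pv.2)))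
    pvFill placed tup ((n : Int) + pairs.length)

-- ===== PRECONDITION & SPEC =====
-- Pre_ excludes exactly the inputs where Python A raises (len(pos) != len(val):
-- the ValueError is caught by the bare except, whose tl.insert(pos, val) then raises TypeError).
def Pre_insert_into_tuple (tup : List Int) (pos : List Int) (val : List Int) : Prop :=
  pos.length = val.length
instance (tup : List Int) (pos : List Int) (val : List Int) : Decidable (Pre_insert_into_tuple tup pos val) := by unfold Pre_insert_into_tuple; infer_instance

def pvWitness_insert_into_tuple : List Int × List Int × List Int := ([0, 1, 2, 3], [5, 1], [9, 8])

def Spec_insert_into_tuple (tup : List Int) (pos : List Int) (val : List Int) (out : List Int) : Prop := out = insert_into_tuple_alt tup pos val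
instance (tup : List Int) (pos : List Int) (val : List Int) (out : List Int) : Decidable (Spec_insert_into_tuple tup pos val out) := by unfold Spec_insert_into_tuple; infer_instance

-- ===== CLAIM (what is proved, stated in full; the proofs are below) =====
def Claim_equal_insert_into_tuple : Prop := ∀ (tup : List Int) (pos : List Int) (val : List Int), Dom_insert_into_tuple tup pos val → Pre_insert_into_tuple tup pos val → Spec_insert_into_tuple tup pos val (insert_into_tuple tup pos val)

-- ===== LEMMAS AND PROOFS =====

-- Proof-side view of the filling pass: association-list lookup and count.
def pvLook (ps : List (Int × Int)) (q : Int) : Option Int :=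
  (ps.find? (fun pr => pr.1 == q)).map (fun pr => pr.2)

def pvCount (ps : List (Int × Int)) (q : Int) : Nat :=
  ps.countP (fun pr => decide (pr.1 < q))

def pvFillF (ps : List (Int × Int)) (tup : List Int) (N : Nat) : List Int :=
  (List.range N).map (fun q =>
    match pvLook ps (Int.ofNat q) with
    | some v => v
    | none => tup.getD (q - pvCount ps (Int.ofNat q)) 0)

theorem pv_insert_take_drop (xs : List Int) (i : Int) (v : Int) :
    PySem.List.insert xs i v =
      xs.take (PySem.List.clampIdx xs.length i) ++ v :: xs.drop (PySem.List.clampIdx xs.length i) := by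
  have h : (if i < 0 then max (i + ↑xs.length) 0 else min i ↑xs.length).toNat
      = PySem.List.clampIdx xs.length i := by
    simp [PySem.List.clampIdx]; split_ifs <;> omega
  simp [PySem.List.insert, PySem.List.sliceIndices, h]

theorem pv_clamp_eq (p : Int) (m : Nat) :
    pvClamp p (m : Int) = ((PySem.List.clampIdx m p : Nat) : Int) := by
  simp [pvClamp, PySem.List.clampIdx]; split_ifs <;> omega

theorem pv_clamp_idem (m : Nat) (i : Int) :
    PySem.List.clampIdx m ((PySem.List.clampIdx m i : Nat) : Int) = PySem.List.clampIdx m i := by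
  simp [PySem.List.clampIdx]; split_ifs <;> omega

theorem pv_clamp_bounds (p m : Int) (hm : 0 ≤ m) : 0 ≤ pvClamp p m ∧ pvClamp p m ≤ m := by
  simp [pvClamp]; split_ifs <;> omega

theorem pv_idxStep_eq (n : Nat) (idx : List Int) (pv : Int × Int) :
    pvIdxStep n idx pv =
      idx.map (pvBump (pvClamp pv.1 ((n : Int) + idx.length))) ++
        [pvClamp pv.1 ((n : Int) + idx.length)] := rfl

theorem pv_length_fillF (ps : List (Int × Int)) (tup : List Int) (N : Nat) :
    (pvFillF ps tup N).length = N := by simp [pvFillF]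

theorem pvLook_cons (pr : Int × Int) (ps : List (Int × Int)) (q : Int) :
    pvLook (pr :: ps) q = if pr.1 = q then some pr.2 else pvLook ps q := by
  by_cases h : pr.1 = q <;> simp [pvLook, h]

theorem pvLook_map_congr (F : Int → Int) (q q' : Int) (h : ∀ x : Int, F x = q ↔ x = q')
    (ps : List (Int × Int)) :
    pvLook (ps.map (fun pr => (F pr.1, pr.2))) q = pvLook ps q' := by
  induction ps with
  | nil => rfl
  | cons pr ps ih =>
    rw [List.map_cons, pvLook_cons, pvLook_cons, ih]
    by_cases hc : pr.1 = q'
    · rw [if_pos ((h pr.1).mpr hc), if_pos hc]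
    · rw [if_neg (fun hh => hc ((h pr.1).mp hh)), if_neg hc]

theorem pvLook_map_none (F : Int → Int) (q : Int) (h : ∀ x : Int, F x ≠ q)
    (ps : List (Int × Int)) :
    pvLook (ps.map (fun pr => (F pr.1, pr.2))) q = none := by
  induction ps with
  | nil => rfl
  | cons pr ps ih =>
    rw [List.map_cons, pvLook_cons, ih]
    simp [h pr.1]

theorem pvCount_map_congr (F : Int → Int) (q q' : Int) (h : ∀ x : Int, F x < q ↔ x < q')
    (ps : List (Int × Int)) :
    pvCount (ps.map (fun pr => (F pr.1, pr.2))) q = pvCount ps q' := by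
  simp only [pvCount, List.countP_map]
  exact List.countP_congr (fun pr _ => by simp [Function.comp, h pr.1])

theorem pvLook_append (ps qs : List (Int × Int)) (q : Int) :
    pvLook (ps ++ qs) q = (pvLook ps q).or (pvLook qs q) := by
  simp only [pvLook, List.find?_append]
  cases List.find? (fun pr => pr.1 == q) ps <;> simp

theorem pvCount_append (ps qs : List (Int × Int)) (q : Int) :
    pvCount (ps ++ qs) q = pvCount ps q + pvCount qs q := by simp [pvCount]

-- the crux: one Python list.insert on a filled list = filling with bumped indices plus the new pair
theorem pv_insert_fillF (ps : List (Int × Int)) (tup : List Int) (N : Nat) (e v : Int)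
    (he0 : 0 ≤ e) (heN : e ≤ (N : Int)) :
    PySem.List.insert (pvFillF ps tup N) e v =
      pvFillF (ps.map (fun pr => (pvBump e pr.1, pr.2)) ++ [(e, v)]) tup (N + 1) := by
  set t := e.toNat with ht
  have hte : (t : Int) = e := Int.toNat_of_nonneg he0
  have htN : t ≤ N := by omega
  have hL : (pvFillF ps tup N).length = N := pv_length_fillF ps tup N
  have hclamp : PySem.List.clampIdx (pvFillF ps tup N).length e = t := by
    rw [hL]; simp only [PySem.List.clampIdx]; split_ifs <;> omega
  rw [pv_insert_take_drop, hclamp]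
  set L := pvFillF ps tup N with hLdef
  apply List.ext_getElem
  · simp [hL, pv_length_fillF]
  intro q hq1 hq2
  rw [pv_length_fillF] at hq2
  have hgR : (pvFillF (ps.map (fun pr => (pvBump e pr.1, pr.2)) ++ [(e, v)]) tup (N + 1))[q] =
      (match pvLook (ps.map (fun pr => (pvBump e pr.1, pr.2)) ++ [(e, v)]) (Int.ofNat q) with
       | some w => w
       | none => tup.getD (q - pvCount (ps.map (fun pr => (pvBump e pr.1, pr.2)) ++ [(e, v)]) (Int.ofNat q)) 0) := by
    simp [pvFillF]
  rw [hgR]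
  have htake : (L.take t).length = t := by simp [hL, htN]
  rcases lt_trichotomy q t with hlt | heq | hgt
  · -- q < t : untouched prefix
    rw [List.getElem_append_left (by simpa [htake] using hlt)]
    rw [List.getElem_take]
    rw [pvLook_append, pvCount_append]
    rw [pvLook_map_congr (pvBump e) (Int.ofNat q) (Int.ofNat q)
      (fun x => by simp [pvBump, Int.ofNat_eq_natCast]; split_ifs <;> omega),
      pvCount_map_congr (pvBump e) (Int.ofNat q) (Int.ofNat q)
      (fun x => by simp [pvBump, Int.ofNat_eq_natCast]; split_ifs <;> omega)]
    have h1 : pvLook [(e, v)] (Int.ofNat q) = none := by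
      simp [pvLook, Int.ofNat_eq_natCast]; omega
    have h2 : pvCount [(e, v)] (Int.ofNat q) = 0 := by
      simp [pvCount, Int.ofNat_eq_natCast]; omega
    rw [h1, h2]
    simp [hLdef, pvFillF]
  · -- q = t : the inserted value
    rw [List.getElem_append_right (by omega)]
    have hqe : (Int.ofNat q) = e := by simp [Int.ofNat_eq_natCast]; omega
    have h1 : pvLook (ps.map (fun pr => (pvBump e pr.1, pr.2)) ++ [(e, v)]) (Int.ofNat q) = some v := by
      rw [hqe, pvLook_append,
        pvLook_map_none (pvBump e) e (fun x => by simp [pvBump]; split_ifs <;> omega)]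
      simp [pvLook]
    rw [h1]
    simp [htake, heq]
  · -- q > t : shifted suffix
    rw [List.getElem_append_right (by omega)]
    simp only [htake]
    obtain ⟨k, hk⟩ : ∃ k, q - t = k + 1 := ⟨q - t - 1, by omega⟩
    simp only [hk, List.getElem_cons_succ, List.getElem_drop]
    have hidx : t + k = q - 1 := by omega
    rw [pvLook_append, pvCount_append]
    rw [pvLook_map_congr (pvBump e) (Int.ofNat q) (Int.ofNat (q - 1))
      (fun x => by simp [pvBump, Int.ofNat_eq_natCast]; split_ifs <;> omega),
      pvCount_map_congr (pvBump e) (Int.ofNat q) (Int.ofNat (q - 1))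
      (fun x => by simp [pvBump, Int.ofNat_eq_natCast]; split_ifs <;> omega)]
    have h1 : pvLook [(e, v)] (Int.ofNat q) = none := by
      simp [pvLook, Int.ofNat_eq_natCast]; omega
    have h2 : pvCount [(e, v)] (Int.ofNat q) = 1 := by
      simp [pvCount, Int.ofNat_eq_natCast]; omega
    rw [h1, h2]
    simp only [hidx, hLdef, pvFillF, List.getElem_map, List.getElem_range, Option.or_none]
    rcases hlook : pvLook ps (Int.ofNat (q - 1)) with _ | w
    · simp only []
      congr 1
      omega
    · simp

-- invariants of B's index list
theorem pv_idx_inv (n : Nat) (ps : List (Int × Int)) :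
    (ps.foldl (pvIdxStep n) []).length = ps.length ∧
    (ps.foldl (pvIdxStep n) []).Nodup ∧
    (∀ x ∈ ps.foldl (pvIdxStep n) [], 0 ≤ x ∧ x < (n : Int) + ps.length) := by
  induction ps using List.reverseRecOn with
  | nil => simp
  | append_singleton qs pv ih =>
    obtain ⟨hlen, hnd, hbd⟩ := ih
    rw [List.foldl_append, List.foldl_cons, List.foldl_nil, pv_idxStep_eq]
    set idx := qs.foldl (pvIdxStep n) [] with hidx
    set e := pvClamp pv.1 ((n : Int) + idx.length) with he
    have hcb := pv_clamp_bounds pv.1 ((n : Int) + idx.length) (by positivity)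
    rw [← he] at hcb
    have hlen' : (idx.length : Int) = qs.length := by exact_mod_cast congrArg Nat.cast hlen
    refine ⟨?_, ?_, ?_⟩
    · simp [hlen]
    · refine List.Nodup.append ?_ (List.nodup_singleton _) ?_
      · exact hnd.map (fun a b hab => by simp [pvBump] at hab; split_ifs at hab <;> omega)
      · intro x hx hx'
        simp at hx'
        subst hx'
        obtain ⟨y, hy, hyx⟩ := List.mem_map.mp hx
        simp [pvBump] at hyx; split_ifs at hyx <;> omega
    · intro x hx
      simp only [List.mem_append, List.mem_map, List.mem_singleton] at hx
      rcases hx with (⟨y, hy, rfl⟩ | rfl)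
      · have := hbd y hy
        simp [pvBump, List.length_append]
        split_ifs <;> omega
      · simp [List.length_append]
        omega

-- A's insert fold computed as a direct fill
theorem pv_fillF_nil (tup : List Int) :
    pvFillF [] tup tup.length = tup := by
  apply List.ext_getElem (by simp [pv_length_fillF])
  intro q h1 h2
  rw [pv_length_fillF] at h1
  simp [pvFillF, pvLook, pvCount, List.getD_eq_getElem?_getD, List.getElem?_eq_getElem h2]

theorem pv_main (n : Nat) (tup : List Int) (hn : tup.length = n) (ps : List (Int × Int)) :
    ps.foldl (fun tl pv => PySem.List.insert tl pv.1 pv.2) tup =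
      pvFillF ((ps.foldl (pvIdxStep n) []).zip (ps.map (fun pv => pv.2))) tup (n + ps.length) := by
  induction ps using List.reverseRecOn with
  | nil =>
    subst hn
    simpa using (pv_fillF_nil tup).symm
  | append_singleton qs pv ih =>
    obtain ⟨hlen, hnd, hbd⟩ := pv_idx_inv n qs
    rw [List.foldl_append, List.foldl_cons, List.foldl_nil, ih]
    rw [List.foldl_append, List.foldl_cons, List.foldl_nil, pv_idxStep_eq]
    set idx := qs.foldl (pvIdxStep n) [] with hidx
    set N := n + qs.length with hN
    have hm : (n : Int) + idx.length = (N : Int) := by rw [hlen, hN]; push_cast; omega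
    rw [hm]
    set Z := idx.zip (qs.map (fun pv => pv.2)) with hZ
    set e := pvClamp pv.1 (N : Int) with he
    have heq : e = ((PySem.List.clampIdx N pv.1 : Nat) : Int) := pv_clamp_eq pv.1 N
    have he0 : 0 ≤ e := by rw [heq]; positivity
    have heN : e ≤ (N : Int) := by
      rw [heq]
      have : PySem.List.clampIdx N pv.1 ≤ N := by
        simp [PySem.List.clampIdx]; split_ifs <;> omega
      exact_mod_cast this
    have hLen : (pvFillF Z tup N).length = N := pv_length_fillF Z tup N
    have hstep : PySem.List.insert (pvFillF Z tup N) pv.1 pv.2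
        = PySem.List.insert (pvFillF Z tup N) e pv.2 := by
      rw [pv_insert_take_drop, pv_insert_take_drop, hLen, heq, pv_clamp_idem]
    rw [hstep, pv_insert_fillF Z tup N e pv.2 he0 heN]
    have hlen2 : (idx.map (pvBump e)).length = (qs.map (fun pv => pv.2)).length := by
      simp [hlen]
    have hz1 : (idx.map (pvBump e) ++ [e]).zip ((qs ++ [pv]).map (fun pv => pv.2))
        = (idx.map (pvBump e)).zip (qs.map (fun pv => pv.2)) ++ [(e, pv.2)] := by
      rw [List.map_append, List.zip_append hlen2]; rfl
    have hz2 : (idx.map (pvBump e)).zip (qs.map (fun pv => pv.2))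
        = Z.map (fun pr => (pvBump e pr.1, pr.2)) := by
      rw [hZ, List.zip_map_left]; rfl
    rw [hz1, hz2]
    congr 1
    simp [hN]
    omega

-- B's fill loop equals the functional fill (association-list facts first)
theorem pv_count_eq_key (ps : List (Int × Int)) (q : Int) (hnd : (ps.map Prod.fst).Nodup) :
    ps.countP (fun pr => decide (pr.1 = q)) = if (pvLook ps q).isSome then 1 else 0 := by
  induction ps with
  | nil => simp [pvLook]
  | cons pr ps ih =>
    simp only [List.map_cons, List.nodup_cons] at hnd
    rw [List.countP_cons, pvLook_cons, ih hnd.2]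
    by_cases h : pr.1 = q
    · subst h
      have : pvLook ps pr.1 = none := by
        rcases hl : pvLook ps pr.1 with _ | w
        · rfl
        · exfalso
          apply hnd.1
          simp only [pvLook, Option.map_eq_some_iff] at hl
          obtain ⟨p, hp, _⟩ := hl
          have := List.find?_some hp
          have hmem := List.mem_of_find?_eq_some hp
          exact List.mem_map.mpr ⟨p, hmem, by simpa using this⟩
      simp [this]
    · simp [h]

theorem pv_count_succ (ps : List (Int × Int)) (q : Int) :
    pvCount ps (q + 1) = pvCount ps q + ps.countP (fun pr => decide (pr.1 = q)) := by
  induction ps with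
  | nil => rfl
  | cons pr ps ih =>
    simp only [pvCount, List.countP_cons] at *
    rw [ih]
    by_cases h1 : pr.1 < q
    · have ha : pr.1 < q + 1 := by omega
      have hb : ¬ pr.1 = q := by omega
      simp [h1, ha, hb]; omega
    · by_cases h2 : pr.1 = q
      · have ha : pr.1 < q + 1 := by omega
        simp [h2]; omega
      · have ha : ¬ pr.1 < q + 1 := by omega
        simp [h1, ha, h2]

theorem pv_count_range (ps : List (Int × Int)) (hnd : (ps.map Prod.fst).Nodup)
    (hnn : ∀ pr ∈ ps, 0 ≤ pr.1) (N : Nat) :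
    pvCount ps (Int.ofNat N) = ((List.range N).countP (fun j => (pvLook ps (Int.ofNat j)).isSome)) := by
  induction N with
  | zero =>
    simp only [List.range_zero, List.countP_nil]
    simp only [pvCount]
    rw [List.countP_eq_zero]
    intro pr hpr
    simpa using not_lt.mpr (hnn pr hpr)
  | succ N ih =>
    have h1 : (Int.ofNat (N + 1)) = (Int.ofNat N) + 1 := by simp
    rw [h1, pv_count_succ, List.range_succ, List.countP_append, ih,
      pv_count_eq_key ps (Int.ofNat N) hnd]
    simp

theorem pv_count_le (ps : List (Int × Int)) (hnd : (ps.map Prod.fst).Nodup)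
    (hnn : ∀ pr ∈ ps, 0 ≤ pr.1) (N : Nat) : pvCount ps (Int.ofNat N) ≤ N := by
  rw [pv_count_range ps hnd hnn N]
  have := List.countP_le_length (p := fun j => (pvLook ps (Int.ofNat j)).isSome) (l := List.range N)
  simpa using this

theorem pv_items_ofList (ps : List (Int × Int)) (hnd : (ps.map Prod.fst).Nodup) :
    (PySem.Dict.ofList ps).items = ps := by
  have h := PySem.Dict.items_foldl_insert_fresh ps Prod.fst Prod.snd PySem.Dict.empty
    (fun a _ => rfl) hnd
  simpa using h

theorem pv_get?_ofList (ps : List (Int × Int)) (hnd : (ps.map Prod.fst).Nodup) (q : Int) :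
    (PySem.Dict.ofList ps).get? q = pvLook ps q := by
  simp [PySem.Dict.get?, pv_items_ofList ps hnd, pvLook]

theorem pv_fillF_succ (ps : List (Int × Int)) (tup : List Int) (N : Nat) :
    pvFillF ps tup (N + 1) = pvFillF ps tup N ++
      [match pvLook ps (Int.ofNat N) with
       | some v => v
       | none => tup.getD (N - pvCount ps (Int.ofNat N)) 0] := by
  simp [pvFillF, List.range_succ]

theorem pv_fill_eq (ps : List (Int × Int)) (tup : List Int) (N : Nat)
    (hnd : (ps.map Prod.fst).Nodup) (hnn : ∀ pr ∈ ps, 0 ≤ pr.1) :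
    pvFill (PySem.Dict.ofList ps) tup (N : Int) = pvFillF ps tup N := by
  have hrange : PySem.List.pyRange 0 (N : Int) 1 = (List.range N).map Int.ofNat := by
    rw [PySem.List.pyRange_zero_natCast]
    simp [Int.ofNat_eq_natCast]
  have key : ∀ M : Nat,
      ((List.range M).map Int.ofNat).foldl
        (fun (st : List Int × List Int) q =>
          match (PySem.Dict.ofList ps).get? q with
          | some v => (st.1 ++ [v], st.2)
          | none => (st.1 ++ [st.2.headD 0], st.2.tail)) (([] : List Int), tup)
      = (pvFillF ps tup M, tup.drop (M - pvCount ps (Int.ofNat M))) := by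
    intro M
    induction M with
    | zero =>
      simp [pvFillF]
    | succ M ih =>
      rw [List.range_succ, List.map_append, List.foldl_append, ih, List.map_singleton]
      have hle : pvCount ps (Int.ofNat M) ≤ M := pv_count_le ps hnd hnn M
      have hsucc : (Int.ofNat (M + 1)) = (Int.ofNat M) + 1 := by simp
      rw [List.foldl_cons, List.foldl_nil, pv_get?_ofList ps hnd]
      rcases hl : pvLook ps (Int.ofNat M) with _ | w
      · have hkey : ps.countP (fun pr => decide (pr.1 = (Int.ofNat M))) = 0 := by
          rw [pv_count_eq_key ps _ hnd, hl]; rfl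
        have hc : pvCount ps (Int.ofNat (M + 1)) = pvCount ps (Int.ofNat M) := by
          rw [hsucc, pv_count_succ, hkey]
          omega
        simp only [hl, pv_fillF_succ, hc]
        simp only [Prod.mk.injEq]
        refine ⟨?_, ?_⟩
        · congr 1
          congr 1
          · rw [List.headD_eq_head?_getD, List.head?_drop, List.getD_eq_getElem?_getD]
        · rw [List.tail_drop]
          congr 1
          omega
      · have hkey : ps.countP (fun pr => decide (pr.1 = (Int.ofNat M))) = 1 := by
          rw [pv_count_eq_key ps _ hnd, hl]; rfl
        have hc : pvCount ps (Int.ofNat (M + 1)) = pvCount ps (Int.ofNat M) + 1 := by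
          rw [hsucc, pv_count_succ, hkey]
        simp only [hl, pv_fillF_succ, hc]
        simp only [Prod.mk.injEq]
        refine ⟨?_, ?_⟩
        · trivial
        · congr 1
          omega
  rw [pvFill, hrange, key N]

-- B's whole body, as A's fold over the sorted pairs
theorem pv_alt_eq_foldl (tup pos val : List Int) (hpre : pos.length = val.length) :
    insert_into_tuple_alt tup pos val =
      (PySem.List.sorted2 (pos.zip val) (fun x => x.1) (fun x => x.2)).foldl
        (fun tl pv => PySem.List.insert tl pv.1 pv.2) tup := by
  unfold insert_into_tuple_alt
  rw [if_neg (by omega)]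
  dsimp only
  set pairs := PySem.List.sorted2 (pos.zip val) (fun x => x.1) (fun x => x.2) with hpairs
  obtain ⟨hlen, hnd, hbd⟩ := pv_idx_inv tup.length pairs
  set idx := pairs.foldl (pvIdxStep tup.length) [] with hidx
  have hlenv : idx.length ≤ (pairs.map (fun pv => pv.2)).length := by simp [hlen]
  have hnd' : ((idx.zip (pairs.map (fun pv => pv.2))).map Prod.fst).Nodup := by
    rw [List.map_fst_zip hlenv]; exact hnd
  have hnn : ∀ pr ∈ idx.zip (pairs.map (fun pv => pv.2)), 0 ≤ pr.1 := by
    intro pr hpr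
    exact (hbd pr.1 (List.of_mem_zip hpr).1).1
  have hcast : ((tup.length : Int) + pairs.length) = ((tup.length + pairs.length : Nat) : Int) := by
    push_cast; ring
  rw [hcast, pv_fill_eq _ tup _ hnd' hnn, ← pv_main tup.length tup rfl pairs]

-- ===== VERDICT (by name: the statement is the Claim_ definition above) =====
theorem insert_into_tuple_spec : Claim_equal_insert_into_tuple := by
  unfold Claim_equal_insert_into_tuple
  intro tup pos val _ hpre
  unfold Pre_insert_into_tuple at hpre
  unfold Spec_insert_into_tuple
  rw [pv_alt_eq_foldl tup pos val hpre]
  unfold insert_into_tuple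
  rw [if_neg (by omega)]
  by_cases h0 : pos.length = 0
  · rw [if_pos h0]
    have hnil : pos = [] := List.length_eq_zero_iff.mp h0
    subst hnil
    simp [PySem.List.sorted2]
  · rw [if_neg h0]
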